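-- pv_equiv track=rewrite | github.com/destiny1017/codetree-TILs | 240903/연쇄로 터지는 폭탄/series-of-bombs-detonating.py | boom_left
-- ===== SOURCE A (Python) =====
-- def boom_left(start, step, total_cnt, bombs):
--     boom_range = start - step
--     cnt = 0
--
--     # 폭발 범위까지 폭발 반복
--     while bombs:
--         next_bomb = bombs.pop()
--         if next_bomb < boom_range:
--             bombs.append(next_bomb)
--             break
--         cnt += 1
--
--     # 마지막 터진 폭탄이 있으면 범위 늘려서 재귀호출
--     if cnt > 0:
--         return boom_left(next_bomb, step+1, total_cnt + cnt, bombs)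
--     else:
--         return total_cnt
-- ===== SOURCE B (Python) =====
-- def boom_left(start, step, total_cnt, bombs):
--     i = len(bombs)
--     while True:
--         boom_range = start - step
--         j = i
--         while j > 0 and bombs[j - 1] >= boom_range:
--             j -= 1
--         if j == i:
--             return total_cnt
--         total_cnt += i - j
--         if j == 0:
--             return total_cnt
--         start = bombs[j - 1]
--         step += 1
--         i = j
-- ===== Notes on version B (the rewrite author's own statement) =====
-- stated objective: alternative
-- what changed: Replaces A's recursion with mutating pop/append on the bomb list by a non-recursive two-level index scan: a pointer walks left over the untouched list, each detonation wave lowering it, so the list is never copied or mutated.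
import Mathlib
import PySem

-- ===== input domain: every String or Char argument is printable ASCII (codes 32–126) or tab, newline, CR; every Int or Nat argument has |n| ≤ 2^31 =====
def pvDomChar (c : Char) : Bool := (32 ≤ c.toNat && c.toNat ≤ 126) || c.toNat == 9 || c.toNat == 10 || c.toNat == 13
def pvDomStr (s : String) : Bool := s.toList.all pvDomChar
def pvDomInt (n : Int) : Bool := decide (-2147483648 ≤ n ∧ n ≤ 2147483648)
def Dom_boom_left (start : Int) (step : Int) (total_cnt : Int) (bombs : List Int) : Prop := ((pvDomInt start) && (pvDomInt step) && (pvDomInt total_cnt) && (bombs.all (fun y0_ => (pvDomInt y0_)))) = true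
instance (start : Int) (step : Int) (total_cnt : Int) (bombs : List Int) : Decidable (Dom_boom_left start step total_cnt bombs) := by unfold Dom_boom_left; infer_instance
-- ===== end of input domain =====

-- B replaces A's recursion-with-list-mutation by a non-recursive index scan over the unchanged list; equal RETURN values
-- (A mutates `bombs` in place by popping; the equivalence proved here is about the return value only).

-- ===== PORT A =====
-- A's inner `while bombs:` loop: Python pops from the END, so it is run on `bombs.reverse`.
-- Returns (cnt, last popped bomb `next_bomb`, remaining bombs still reversed).
def pyBoomInner (br : Int) : List Int → Nat × Option Int × List Int
  | [] => (0, none, [])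
  | b :: rest =>
      if b < br then (0, some b, b :: rest)      -- append back and break
      else
        let r := pyBoomInner br rest
        (r.1 + 1, some (r.2.1.getD b), r.2.2)

-- length invariant cited by boom_left's decreasing_by
theorem pyBoomInner_len (br : Int) (l : List Int) :
    (pyBoomInner br l).2.2.length + (pyBoomInner br l).1 = l.length := by
  induction l with
  | nil => simp [pyBoomInner]
  | cons b rest ih =>
    by_cases h : b < br <;> · simp only [pyBoomInner, h]; simp; try omega

def boom_left (start : Int) (step : Int) (total_cnt : Int) (bombs : List Int) : Int :=
  if _h : 0 < (pyBoomInner (start - step) bombs.reverse).1 then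
    boom_left ((pyBoomInner (start - step) bombs.reverse).2.1.getD 0) (step + 1)
      (total_cnt + ((pyBoomInner (start - step) bombs.reverse).1 : Int))
      (pyBoomInner (start - step) bombs.reverse).2.2.reverse
  else
    total_cnt
termination_by bombs.length
decreasing_by
  have := pyBoomInner_len (start - step) bombs.reverse
  simp at this ⊢
  omega

-- ===== PORT B =====
-- B's element access `bombs[j]` (index always in range when used)
def pyGetA (bombs : List Int) (j : Nat) : Int := bombs.getD j 0

-- B's inner `while j > 0 and bombs[j-1] >= boom_range: j -= 1` loop
def scanDown (bombs : List Int) (br : Int) : Nat → Nat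
  | 0 => 0
  | j + 1 => if pyGetA bombs j < br then j + 1 else scanDown bombs br j

theorem scanDown_le (bombs : List Int) (br : Int) (i : Nat) : scanDown bombs br i ≤ i := by
  induction i with
  | zero => simp [scanDown]
  | succ j ih =>
    rw [scanDown]
    split <;> omega

-- B's outer `while True` loop, state (start, step, total_cnt, i)
def bAux (bombs : List Int) (start step total_cnt : Int) (i : Nat) : Int :=
  if _h : scanDown bombs (start - step) i = i then total_cnt
  else if scanDown bombs (start - step) i = 0 then total_cnt + (i : Int)
  else bAux bombs (pyGetA bombs (scanDown bombs (start - step) i - 1)) (step + 1)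
        (total_cnt + (i : Int) - (scanDown bombs (start - step) i : Int))
        (scanDown bombs (start - step) i)
termination_by i
decreasing_by
  have := scanDown_le bombs (start - step) i
  omega

def boom_left_alt (start : Int) (step : Int) (total_cnt : Int) (bombs : List Int) : Int :=
  bAux bombs start step total_cnt bombs.length

-- ===== PRECONDITION & SPEC =====
def Spec_boom_left (start : Int) (step : Int) (total_cnt : Int) (bombs : List Int) (out : Int) : Prop := out = boom_left_alt start step total_cnt bombs
instance (start : Int) (step : Int) (total_cnt : Int) (bombs : List Int) (out : Int) : Decidable (Spec_boom_left start step total_cnt bombs out) := by unfold Spec_boom_left; infer_instance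

-- ===== CLAIM (what is proved, stated in full; the proofs are below) =====
def Claim_equal_boom_left : Prop := ∀ (start : Int) (step : Int) (total_cnt : Int) (bombs : List Int), Dom_boom_left start step total_cnt bombs → Spec_boom_left start step total_cnt bombs (boom_left start step total_cnt bombs)

-- ===== LEMMAS AND PROOFS =====

theorem take_rev_succ (bombs : List Int) (n : Nat) (hn : n < bombs.length) :
    (bombs.take (n + 1)).reverse = pyGetA bombs n :: (bombs.take n).reverse := by
  have hget : bombs[n]? = some (pyGetA bombs n) := by
    simp [pyGetA, List.getD_eq_getElem?_getD, List.getElem?_eq_getElem hn]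
  rw [List.take_add_one, hget]
  simp

-- What A's inner pop loop does to the reversed prefix `(bombs.take i).reverse`, in terms of B's scanDown.
theorem inner_spec (bombs : List Int) (br : Int) :
    ∀ i, i ≤ bombs.length →
      pyBoomInner br ((bombs.take i).reverse) =
        (i - scanDown bombs br i,
         if i = 0 then none else some (pyGetA bombs (max (scanDown bombs br i) 1 - 1)),
         (bombs.take (scanDown bombs br i)).reverse) := by
  intro i
  induction i with
  | zero => intro _; simp [pyBoomInner, scanDown]
  | succ n ih =>
    intro hle
    have hn : n < bombs.length := by omega
    have htake := take_rev_succ bombs n hn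
    by_cases h : pyGetA bombs n < br
    · -- break immediately: scanDown (n+1) = n+1
      have hscan : scanDown bombs br (n + 1) = n + 1 := by rw [scanDown, if_pos h]
      rw [htake, hscan]
      simp only [pyBoomInner, if_pos h]
      simp [htake]
    · -- continue on the rest
      have hscan : scanDown bombs br (n + 1) = scanDown bombs br n := by
        rw [scanDown, if_neg h]
      have hraux := ih (by omega)
      have hj := scanDown_le bombs br n
      rw [htake, hscan]
      simp only [pyBoomInner, if_neg h, hraux]
      have h1 : n + 1 - scanDown bombs br n = (n - scanDown bombs br n) + 1 := by omega
      rcases Nat.eq_zero_or_pos n with hn0 | hn0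
      · subst hn0
        simp [scanDown]
      · have hne : n ≠ 0 := by omega
        simp only [hne, ite_false, Option.getD_some, h1, Nat.succ_ne_zero]

-- Main correspondence: A run on the prefix `bombs.take i` equals B's loop body at pointer i.
theorem main_corr (bombs : List Int) :
    ∀ i, i ≤ bombs.length → ∀ start step total_cnt,
      boom_left start step total_cnt (bombs.take i) = bAux bombs start step total_cnt i := by
  intro i
  induction i using Nat.strong_induction_on with
  | _ i ih =>
    intro hle start step total_cnt
    have hspec := inner_spec bombs (start - step) i hle
    set j := scanDown bombs (start - step) i with hjdef
    have hj : j ≤ i := scanDown_le bombs (start - step) i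
    rw [boom_left.eq_def, hspec]
    by_cases hji : j = i
    · -- cnt = 0: both return total_cnt
      rw [bAux.eq_def]
      simp [hji, ← hjdef]
    · have hcnt : 0 < i - j := by omega
      have hipos : i ≠ 0 := by omega
      rw [bAux.eq_def]
      simp only [← hjdef, dif_neg hji]
      simp only [hcnt, dif_pos, hipos, ite_false, Option.getD_some]
      by_cases hj0 : j = 0
      · -- exhausted: A recurses once more with the empty list and returns
        simp only [hj0, List.take_zero, List.reverse_nil, if_pos]
        rw [boom_left.eq_def]
        simp only [pyBoomInner, List.reverse_nil]
        simp
      · -- boundary bomb found: recurse / loop with pointer j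
        simp only [if_neg hj0]
        rw [List.reverse_reverse]
        have hrec := ih j (by omega) (by omega) (pyGetA bombs (max j 1 - 1)) (step + 1)
          (total_cnt + ((i - j : Nat) : Int))
        rw [hrec]
        have hmax : max j 1 = j := by omega
        have hcast : total_cnt + ((i - j : Nat) : Int) = total_cnt + (i : Int) - (j : Int) := by
          push_cast [Nat.cast_sub hj]; ring
        rw [hmax, hcast]

-- ===== VERDICT (by name: the statement is the Claim_ definition above) =====
theorem boom_left_spec : Claim_equal_boom_left := by
  intro start step total_cnt bombs _
  unfold Spec_boom_left boom_left_alt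
  have := main_corr bombs bombs.length (le_refl _) start step total_cnt
  simpa using this
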